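-- pv_equiv track=rewrite | github.com/G-story/algorithm | jaehasafe/jaehasafe.py | get_min_dial_cnt
-- ===== SOURCE A (Python) =====
-- def get_index_of_substring(origin, substring):
--     for i in range(len(origin)):
--         if origin[i] == substring[0]:
--             is_match = True
--             dup_str = origin[i]
--             prefix = ''
--             suffix = ''
--             dup_str2 = ''
--             for j in range(1, len(substring)):
--                 dup_str += substring[j]
--                 if origin[i + j] != substring[j]:
--                     is_match = False
--                     dup_str_last_idx = len(dup_str) - 1
--                     for k in range(dup_str_last_idx):
--                         prefix += dup_str[k]
--                         suffix = dup_str[dup_str_last_idx - k] + suffix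
--                         if prefix == suffix:
--                             dup_str2 = prefix
--                     if len(dup_str2) > 0:
--                         i += len(dup_str) - len(dup_str2) - 1
--                     break
--             if is_match:
--                 return i
--
-- def get_min_dial_cnt(states):
--     min_dial_cnt = 0
--
--     for i in range(len(states) - 1):
--         if i % 2 == 0:
--             min_dial_cnt += get_index_of_substring(states[i + 1] + states[i + 1], states[i])
--         else:
--             min_dial_cnt += get_index_of_substring(states[i] + states[i], states[i + 1])
--
--     return min_dial_cnt
-- ===== SOURCE B (Python) =====
-- M = (1 << 61) - 1
-- B = 131
--
-- def _rk_first(t, p):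
--     """Rabin-Karp: first index of p in t, verified on hash hit."""
--     n, m = len(t), len(p)
--     hp = 0
--     for c in p:
--         hp = (hp * B + ord(c)) % M
--     h = 0
--     for c in t[:m]:
--         h = (h * B + ord(c)) % M
--     pw = pow(B, m - 1, M)
--     for i in range(n - m + 1):
--         if h == hp and t[i:i + m] == p:
--             return i
--         if i + m < n:
--             h = ((h - ord(t[i]) * pw) * B + ord(t[i + m])) % M
--
-- def get_min_dial_cnt(states):
--     total = 0
--     for k in range(len(states) - 1):
--         if k % 2 == 0:
--             pat, s = states[k], states[k + 1]
--         else: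
--             pat, s = states[k + 1], states[k]
--         total += _rk_first(s + s, pat)
--     return total
-- ===== Notes on version B (the rewrite author's own statement) =====
-- stated objective: alternative
-- what changed: A's hand-rolled naive per-position character scan (with dead prefix/suffix skip bookkeeping) is replaced by Rabin-Karp: a rolling polynomial hash over the doubled string skips positions whose window hash differs from the pattern hash, verifying a full slice comparison only on hash hits.
import Mathlib
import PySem

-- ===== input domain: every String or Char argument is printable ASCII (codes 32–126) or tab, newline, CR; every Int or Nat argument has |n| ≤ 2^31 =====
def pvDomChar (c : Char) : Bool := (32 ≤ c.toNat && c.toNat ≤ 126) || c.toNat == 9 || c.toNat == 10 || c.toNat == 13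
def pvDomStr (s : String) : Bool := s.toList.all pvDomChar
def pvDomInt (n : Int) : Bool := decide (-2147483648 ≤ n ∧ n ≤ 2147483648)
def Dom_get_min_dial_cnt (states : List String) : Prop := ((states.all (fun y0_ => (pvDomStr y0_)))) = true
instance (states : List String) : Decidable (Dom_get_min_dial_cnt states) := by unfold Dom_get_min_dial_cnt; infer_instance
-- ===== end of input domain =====

-- B replaces A's hand-rolled per-position character scan by Rabin-Karp (rolling polynomial hash,
-- full slice comparison only on a hash hit); return-value equivalence on Pre_ (A raises elsewhere).

-- ===== PORT A =====
-- Dead bookkeeping of A's mismatch branch (prefix/suffix/dup_str2): computed, then discarded,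
-- because Python's `for` rebinds `i` each iteration so the `i += …` adjustment has no effect.
def giosKLoop (dupStr : List Char) : List Char × List Char × List Char :=
  (PySem.List.pyRange 0 ((dupStr.length : Int) - 1) 1).foldl
    (fun st k =>
      let pre := st.1 ++ [PySem.List.pyGetD dupStr k ' ']
      let suf := PySem.List.pyGetD dupStr ((dupStr.length : Int) - 1 - k) ' ' :: st.2.1
      (pre, suf, if pre = suf then pre else st.2.2))
    ([], [], [])

-- inner `for j in range(1, len(substring))`; `some b` = loop finished with is_match = b,
-- `none` = IndexError on origin[i + j].  (substring[j] is always in range here: List.getD is exact.)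
def giosJ (origin pat : List Char) (i : Nat) (j : Nat) (dupStr : List Char) : Option Bool :=
  if _h : j < pat.length then
    let dupStr := dupStr ++ [pat.getD j ' ']
    match PySem.List.pyGet? origin ((i : Int) + (j : Int)) with
    | none => none
    | some c =>
      if c ≠ pat.getD j ' ' then
        let _ := giosKLoop dupStr
        some false
      else giosJ origin pat i (j + 1) dupStr
  else some true
termination_by pat.length - j

-- outer `for i in range(len(origin))`; `some i` = `return i`; `none` = the call raises
-- (IndexError inside, or substring[0] on empty substring) or falls through returning None —
-- in get_min_dial_cnt the None is immediately added to an int, a TypeError, so both are `none`.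
def giosLoop (origin pat : List Char) (i : Nat) : Option Int :=
  if h : i < origin.length then
    match PySem.List.pyGet? pat 0 with
    | none => none
    | some p0 =>
      if origin[i] = p0 then
        match giosJ origin pat i 1 [origin[i]] with
        | none => none
        | some true => some (i : Int)
        | some false => giosLoop origin pat (i + 1)
      else giosLoop origin pat (i + 1)
  else none
termination_by origin.length - i

def get_index_of_substring (origin pat : List Char) : Option Int := giosLoop origin pat 0

def aFold (states : List String) : List Int → Option Int → Option Int
  | [], acc => acc
  | i :: rest, acc =>
    match acc with
    | none => none
    | some m =>
      match PySem.List.pyGet? states i, PySem.List.pyGet? states (i + 1) with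
      | some si, some si1 =>
        let r := if PySem.Int.mod i 2 = 0
          then get_index_of_substring (si1.toList ++ si1.toList) si.toList
          else get_index_of_substring (si.toList ++ si.toList) si1.toList
        match r with
        | none => none
        | some v => aFold states rest (some (m + v))
      | _, _ => none

def get_min_dial_cnt (states : List String) : Int :=
  (aFold states (PySem.List.pyRange 0 ((states.length : Int) - 1) 1) (some 0)).getD 0
  -- `.getD 0` is reached only when the Python raises, i.e. outside Pre_get_min_dial_cnt

-- ===== PORT B =====
def pvM : Int := 2305843009213693951   -- (1 << 61) - 1
def pvB : Int := 131

-- `h = 0; for c in cs: h = (h*B + ord(c)) % M`  (Python `%` with positive modulus = Int.emod)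
def rkHash (cs : List Char) : Int :=
  cs.foldl (fun h c => PySem.Int.mod (h * pvB + (c.toNat : Int)) pvM) 0

-- `for i in range(n - m + 1): …` with the rolling-hash update; `some i` = `return i`,
-- `none` = fell through returning None (then `+=` raises TypeError, outside Pre_).
def rkLoop (t p : List Char) (hp pw : Int) (i : Nat) (h : Int) : Option Int :=
  if _hle : i + p.length ≤ t.length then
    if h = hp ∧ PySem.List.slice t (some (i : Int)) (some ((i : Int) + (p.length : Int))) = p then
      some (i : Int)
    else
      rkLoop t p hp pw (i + 1)
        (if i + p.length < t.length then
          PySem.Int.mod ((h - ((PySem.List.pyGetD t (i : Int) ' ').toNat : Int) * pw) * pvB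
            + ((PySem.List.pyGetD t ((i : Int) + (p.length : Int)) ' ').toNat : Int)) pvM
        else h)
  else none
termination_by t.length + 1 - i

def rkFirst (t p : List Char) : Option Int :=
  rkLoop t p (rkHash p) (PySem.Int.mod (pvB ^ (p.length - 1)) pvM) 0 (rkHash (t.take p.length))
  -- `pow(B, m-1, M)` ported by its contract B^(m-1) % M; `t[:m]` = take

def altGo (k : Nat) : List String → Option Int
  | a :: b :: rest =>
      match (if k % 2 = 0 then rkFirst (b.toList ++ b.toList) a.toList
             else rkFirst (a.toList ++ a.toList) b.toList) with
      | none => none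
      | some v => (altGo (k + 1) (b :: rest)).map (v + ·)
  | _ => some 0

def get_min_dial_cnt_alt (states : List String) : Int := (altGo 0 states).getD 0
  -- `.getD 0` is reached only when B's Python raises TypeError, i.e. outside Pre_get_min_dial_cnt

-- ===== PRECONDITION & SPEC =====
def pvPairOK (pat s : String) : Prop := pat ≠ "" ∧ pat.toList <:+: (s.toList ++ s.toList)

-- Pre_ excludes exactly the inputs where A raises: a consecutive pair whose pattern string is
-- empty (substring[0] → IndexError, or the None fall-through → TypeError on +=) or does not occur
-- in the doubled partner string (None fall-through → TypeError, or IndexError near the end).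
def Pre_get_min_dial_cnt (states : List String) : Prop :=
  ∀ i < states.length - 1,
    if i % 2 = 0 then pvPairOK (states.getD i "") (states.getD (i + 1) "")
    else pvPairOK (states.getD (i + 1) "") (states.getD i "")

instance (states : List String) : Decidable (Pre_get_min_dial_cnt states) := by
  unfold Pre_get_min_dial_cnt pvPairOK; infer_instance

def pvWitness_get_min_dial_cnt : List String := ["ab", "ba", "ab"]

def Spec_get_min_dial_cnt (states : List String) (out : Int) : Prop := out = get_min_dial_cnt_alt states
instance (states : List String) (out : Int) : Decidable (Spec_get_min_dial_cnt states out) := by unfold Spec_get_min_dial_cnt; infer_instance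

-- ===== CLAIM (what is proved, stated in full; the proofs are below) =====
def Claim_equal_get_min_dial_cnt : Prop := ∀ (states : List String), Dom_get_min_dial_cnt states → Pre_get_min_dial_cnt states → Spec_get_min_dial_cnt states (get_min_dial_cnt states)

-- ===== LEMMAS AND PROOFS =====

-- The inner j-loop: with every scanned index in range, it reports exactly
-- "positions j … len-1 of pat all match origin at offset i".
theorem giosJ_spec (origin pat : List Char) (i : Nat) :
    ∀ j d, i + pat.length ≤ origin.length →
    giosJ origin pat i j d
      = some (decide (∀ j', j ≤ j' → j' < pat.length → origin.getD (i + j') ' ' = pat.getD j' ' ')) := by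
  suffices H : ∀ n j d, pat.length - j ≤ n → i + pat.length ≤ origin.length →
      giosJ origin pat i j d
        = some (decide (∀ j', j ≤ j' → j' < pat.length → origin.getD (i + j') ' ' = pat.getD j' ' ')) by
    intro j d hle; exact H (pat.length - j) j d le_rfl hle
  intro n
  induction n with
  | zero =>
    intro j d hj hle
    rw [giosJ, dif_neg (by omega)]
    congr 1
    symm
    simp only [decide_eq_true_eq]
    intro j' h1 h2; omega
  | succ n ih =>
    intro j d hj hle
    by_cases h : j < pat.length
    · rw [giosJ, dif_pos h]
      have hij : i + j < origin.length := by omega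
      have hget : PySem.List.pyGet? origin ((i : Int) + (j : Int)) = some origin[i + j] := by
        have : ((i : Int) + (j : Int)) = ((i + j : Nat) : Int) := by push_cast; ring
        rw [this, PySem.List.pyGet?_natCast, List.getElem?_eq_getElem hij]
      rw [hget]
      by_cases hc : origin[i + j] = pat.getD j ' '
      · simp only [ne_eq, hc, not_true_eq_false, if_false]
        rw [ih (j+1) _ (by omega) hle]
        congr 1
        have hgd : origin.getD (i + j) ' ' = origin[i + j] := List.getD_eq_getElem _ _ hij
        congr 1
        apply propext
        constructor
        · intro H j' h1 h2
          rcases Nat.eq_or_lt_of_le h1 with rfl | hlt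
          · rw [hgd]; exact hc
          · exact H j' hlt h2
        · intro H j' h1 h2
          exact H j' (by omega) h2
      · simp only [ne_eq, hc, not_false_eq_true, if_true]
        congr 1
        symm
        simp only [decide_eq_false_iff_not]
        intro H
        exact hc (by rw [← List.getD_eq_getElem _ _ hij]; exact H j le_rfl h)
    · rw [giosJ, dif_neg h]
      congr 1
      symm
      simp only [decide_eq_true_eq]
      intro j' h1 h2; omega

theorem prefix_drop_iff (origin pat : List Char) (i : Nat) (hle : i + pat.length ≤ origin.length) :
    pat <+: origin.drop i ↔ ∀ j < pat.length, origin.getD (i + j) ' ' = pat.getD j ' ' := by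
  rw [List.prefix_iff_eq_take]
  constructor
  · intro h j hj
    have h1 : i + j < origin.length := by omega
    have h2 : j < (origin.drop i).length := by simp; omega
    rw [List.getD_eq_getElem _ _ h1, List.getD_eq_getElem _ _ hj]
    rw [List.getElem_of_eq h hj]
    simp [List.getElem_take, List.getElem_drop]
  · intro h
    apply List.ext_getElem
    · simp; omega
    · intro j hj hj2
      have h1 : i + j < origin.length := by simp at hj; omega
      have := h j hj
      rw [List.getD_eq_getElem _ _ h1, List.getD_eq_getElem _ _ hj] at this
      simpa [List.getElem_take, List.getElem_drop] using this.symm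

-- The outer i-loop, started at any i ≤ first full-match index f, returns f.
theorem giosLoop_eq (origin pat : List Char) (f : Nat)
    (hne : pat ≠ [])
    (hf : pat <+: origin.drop f)
    (hmin : ∀ i < f, ¬ pat <+: origin.drop i) :
    ∀ i ≤ f, giosLoop origin pat i = some (f : Int) := by
  have hlen : 0 < pat.length := List.length_pos_iff.mpr hne
  have hfle : f + pat.length ≤ origin.length := by
    have := hf.length_le
    simp at this
    omega
  have hget0 : PySem.List.pyGet? pat 0 = some (pat.getD 0 ' ') := by
    rw [PySem.List.pyGet?_zero, List.getElem?_eq_getElem hlen, List.getD_eq_getElem _ _ hlen]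
  suffices H : ∀ n i, f - i ≤ n → i ≤ f → giosLoop origin pat i = some (f : Int) by
    intro i hi; exact H (f - i) i le_rfl hi
  intro n
  induction n with
  | zero =>
    intro i hn hi
    have hif : i = f := by omega
    subst hif
    have hio : i < origin.length := by omega
    rw [giosLoop, dif_pos hio, hget0]
    have hchar := (prefix_drop_iff origin pat i (by omega)).mp hf
    have hhead : origin[i] = pat.getD 0 ' ' := by
      have := hchar 0 hlen
      rwa [Nat.add_zero, List.getD_eq_getElem _ _ hio] at this
    have hj : giosJ origin pat i 1 [origin[i]] = some true := by
      rw [giosJ_spec origin pat i 1 [origin[i]] (by omega)]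
      simp only [Option.some.injEq, decide_eq_true_eq]
      intro j' _ h2; exact hchar j' h2
    simp only [hhead] at hj
    simp only [hhead, if_true]
    rw [hj]
  | succ n ih =>
    intro i hn hi
    rcases Nat.eq_or_lt_of_le hi with rfl | hlt
    · exact ih i (by omega) le_rfl
    · have hio : i < origin.length := by omega
      have hile : i + pat.length ≤ origin.length := by omega
      have hnp : ¬ pat <+: origin.drop i := hmin i hlt
      rw [giosLoop, dif_pos hio, hget0]
      by_cases hh : origin[i] = pat.getD 0 ' '
      · have hj : giosJ origin pat i 1 [origin[i]] = some false := by
          rw [giosJ_spec origin pat i 1 [origin[i]] hile]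
          simp only [Option.some.injEq, decide_eq_false_iff_not]
          intro H
          apply hnp
          apply (prefix_drop_iff origin pat i hile).mpr
          intro j hj
          rcases Nat.eq_zero_or_pos j with rfl | hj0
          · rwa [Nat.add_zero, List.getD_eq_getElem _ _ hio]
          · exact H j hj0 hj
        simp only [hh] at hj
        simp only [hh, if_true]
        rw [hj]
        exact ih (i + 1) (by omega) (by omega)
      · simp only [hh, if_false]
        exact ih (i + 1) (by omega) (by omega)

-- A's search equals Chars.find whenever pat is a nonempty infix of origin.
theorem gios_eq_find (origin pat : List Char) (hne : pat ≠ []) (hinf : pat <:+: origin) :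
    get_index_of_substring origin pat = some (PySem.Chars.find origin pat) := by
  have hpos : 0 ≤ PySem.Chars.find origin pat := (PySem.Chars.find_nonneg_iff _ _).mpr hinf
  obtain ⟨h1, h2⟩ := PySem.Chars.find_spec (s := origin) (sub := pat) hpos
  have := giosLoop_eq origin pat (PySem.Chars.find origin pat).toNat hne h1 h2 0 (Nat.zero_le _)
  rw [get_index_of_substring, this, Int.toNat_of_nonneg hpos]

-- ---- B side: the rolling hash ----

def polyH (cs : List Char) : Int := cs.foldl (fun h c => h * pvB + (c.toNat : Int)) 0

theorem pvM_pos : (0 : Int) < pvM := by unfold pvM; norm_num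

theorem mod_is_emod (a : Int) : PySem.Int.mod a pvM = a % pvM :=
  PySem.Int.mod_eq_emod_of_pos pvM_pos

-- the mod-fold computes the pure polynomial fold, reduced mod M
theorem rkHash_emod : ∀ (cs : List Char) (b : Int),
    cs.foldl (fun h c => PySem.Int.mod (h * pvB + (c.toNat : Int)) pvM) (b % pvM)
      = (cs.foldl (fun h c => h * pvB + (c.toNat : Int)) b) % pvM := by
  intro cs
  induction cs with
  | nil => intro b; rfl
  | cons c cs ih =>
    intro b
    simp only [List.foldl_cons]
    rw [mod_is_emod]
    have : (b % pvM * pvB + (c.toNat : Int)) % pvM = (b * pvB + (c.toNat : Int)) % pvM := by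
      have h1 : b % pvM ≡ b [ZMOD pvM] := Int.emod_emod_of_dvd b dvd_rfl
      exact ((h1.mul_right pvB).add_right _)
    rw [this, ih (b * pvB + (c.toNat : Int))]

theorem rkHash_eq (cs : List Char) : rkHash cs = polyH cs % pvM := by
  have := rkHash_emod cs 0
  simpa [rkHash, polyH] using this

theorem polyH_fold (cs : List Char) : ∀ (a : Int),
    cs.foldl (fun h c => h * pvB + (c.toNat : Int)) a = a * pvB ^ cs.length + polyH cs := by
  induction cs with
  | nil => intro a; simp [polyH]
  | cons c cs ih =>
    intro a
    have h2 : polyH (c :: cs) = ((0 : Int) * pvB + (c.toNat : Int)) * pvB ^ cs.length + polyH cs := by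
      rw [polyH, List.foldl_cons]; exact ih _
    simp only [List.foldl_cons, List.length_cons]
    rw [ih (a * pvB + (c.toNat : Int)), h2]
    ring

theorem polyH_cons (c : Char) (u : List Char) :
    polyH (c :: u) = (c.toNat : Int) * pvB ^ u.length + polyH u := by
  rw [polyH, List.foldl_cons, polyH_fold]
  ring

theorem polyH_append_singleton (u : List Char) (d : Char) :
    polyH (u ++ [d]) = polyH u * pvB + (d.toNat : Int) := by
  rw [polyH, List.foldl_append, List.foldl_cons, List.foldl_nil]
  rfl

-- one rolling-hash step: hash of window i ↦ hash of window i+1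
theorem rkHash_roll (t : List Char) (i m : Nat) (hm : 1 ≤ m) (hlt : i + m < t.length) :
    PySem.Int.mod ((rkHash ((t.drop i).take m)
        - ((t[i]'(by omega)).toNat : Int) * PySem.Int.mod (pvB ^ (m - 1)) pvM) * pvB
        + ((t[i + m]'hlt).toNat : Int)) pvM
      = rkHash ((t.drop (i + 1)).take m) := by
  obtain ⟨m', rfl⟩ : ∃ m', m = m' + 1 := ⟨m - 1, by omega⟩
  set u : List Char := (t.drop (i + 1)).take m' with hu
  have hulen : u.length = m' := by
    rw [hu, List.length_take, List.length_drop]; omega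
  have hwin1 : (t.drop i).take (m' + 1) = t[i]'(by omega) :: u := by
    rw [List.drop_eq_getElem_cons (by omega : i < t.length), List.take_succ_cons]
  have hwin2 : (t.drop (i + 1)).take (m' + 1) = u ++ [t[i + (m' + 1)]'hlt] := by
    rw [List.take_add_one, hu]
    congr 1
    have hidx : m' < (t.drop (i + 1)).length := by
      rw [List.length_drop]; omega
    rw [List.getElem?_eq_getElem hidx]
    simp only [List.getElem_drop, Option.toList_some]
    congr 2
    omega
  have hm1 : (m' + 1) - 1 = m' := by omega
  rw [hwin1, hwin2, rkHash_eq, rkHash_eq, polyH_cons, polyH_append_singleton, hulen, hm1,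
    mod_is_emod, mod_is_emod]
  set c : Int := ((t[i]'(by omega)).toNat : Int)
  set d : Int := ((t[i + (m' + 1)]'hlt).toNat : Int)
  set P : Int := pvB ^ m'
  have h1 : (c * P + polyH u) % pvM ≡ c * P + polyH u [ZMOD pvM] :=
    Int.emod_emod_of_dvd _ dvd_rfl
  have h2 : P % pvM ≡ P [ZMOD pvM] := Int.emod_emod_of_dvd _ dvd_rfl
  have : ((c * P + polyH u) % pvM - c * (P % pvM)) * pvB + d
      ≡ ((c * P + polyH u) - c * P) * pvB + d [ZMOD pvM] :=
    ((h1.sub (h2.mul_left c)).mul_right pvB).add_right d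
  calc ((c * P + polyH u) % pvM - c * (P % pvM)) * pvB + d ≡ ((c * P + polyH u) - c * P) * pvB + d [ZMOD pvM] := this
    _ = polyH u * pvB + d := by ring
  -- Int.ModEq is definitionally equality of emods

-- The rolling scan, started at any i ≤ the first full-match index f with the correct
-- window hash, returns f (a hash hit is re-verified, so false positives are skipped).
theorem rkLoop_eq (t p : List Char) (f : Nat)
    (hne : p ≠ [])
    (hf : p <+: t.drop f)
    (hmin : ∀ i < f, ¬ p <+: t.drop i) :
    ∀ i ≤ f, rkLoop t p (rkHash p) (PySem.Int.mod (pvB ^ (p.length - 1)) pvM) i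
        (rkHash ((t.drop i).take p.length)) = some (f : Int) := by
  have hlen : 0 < p.length := List.length_pos_iff.mpr hne
  have hfle : f + p.length ≤ t.length := by
    have := hf.length_le
    simp at this
    omega
  suffices H : ∀ n i, f - i ≤ n → i ≤ f →
      rkLoop t p (rkHash p) (PySem.Int.mod (pvB ^ (p.length - 1)) pvM) i
        (rkHash ((t.drop i).take p.length)) = some (f : Int) by
    intro i hi; exact H (f - i) i le_rfl hi
  intro n
  induction n with
  | zero =>
    intro i hn hi
    have hif : i = f := by omega
    subst hif
    have hsl : PySem.List.slice t (some (i : Int)) (some ((i : Int) + (p.length : Int)))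
        = (t.drop i).take p.length := PySem.List.slice_natCast_add t i p.length
    have htake : (t.drop i).take p.length = p := (List.prefix_iff_eq_take.mp hf).symm
    rw [rkLoop, dif_pos (by omega), if_pos ⟨by rw [htake], by rw [hsl, htake]⟩]
  | succ n ih =>
    intro i hn hi
    rcases Nat.eq_or_lt_of_le hi with rfl | hlt
    · exact ih i (by omega) le_rfl
    · have hile : i + p.length ≤ t.length := by omega
      have hsl : PySem.List.slice t (some (i : Int)) (some ((i : Int) + (p.length : Int)))
          = (t.drop i).take p.length := PySem.List.slice_natCast_add t i p.length
      have hnp : (t.drop i).take p.length ≠ p := by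
        intro h
        exact hmin i hlt (List.prefix_iff_eq_take.mpr h.symm)
      rw [rkLoop, dif_pos hile, if_neg (by rw [hsl]; exact fun h => hnp h.2)]
      have hcond : i + p.length < t.length := by omega
      rw [if_pos hcond]
      have hg1 : PySem.List.pyGetD t (i : Int) ' ' = t[i]'(by omega) := by
        rw [PySem.List.pyGetD_natCast]
        exact List.getD_eq_getElem _ _ (by omega)
      have hg2 : PySem.List.pyGetD t ((i : Int) + (p.length : Int)) ' ' = t[i + p.length]'hcond := by
        have : ((i : Int) + (p.length : Int)) = ((i + p.length : Nat) : Int) := by push_cast; ring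
        rw [this, PySem.List.pyGetD_natCast]
        exact List.getD_eq_getElem _ _ hcond
      rw [hg1, hg2, rkHash_roll t i p.length hlen hcond]
      exact ih (i + 1) (by omega) (by omega)

-- B's search equals Chars.find whenever pat is a nonempty infix of t.
theorem rkFirst_eq_find (t p : List Char) (hne : p ≠ []) (hinf : p <:+: t) :
    rkFirst t p = some (PySem.Chars.find t p) := by
  have hpos : 0 ≤ PySem.Chars.find t p := (PySem.Chars.find_nonneg_iff _ _).mpr hinf
  obtain ⟨h1, h2⟩ := PySem.Chars.find_spec (s := t) (sub := p) hpos
  have := rkLoop_eq t p (PySem.Chars.find t p).toNat hne h1 h2 0 (Nat.zero_le _)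
  rw [Int.toNat_of_nonneg hpos] at this
  rw [List.drop_zero] at this
  rw [rkFirst, this]

theorem altGo_short (k : Nat) (l : List String) (h : l.length ≤ 1) : altGo k l = some 0 := by
  match l with
  | [] => rfl
  | [a] => rfl
  | a :: b :: r => simp at h

theorem aFold_base (states : List String) (k : Nat) (acc : Int) (h : states.length ≤ k + 1) :
    aFold states (PySem.List.pyRange (k : Int) ((states.length : Int) - 1) 1) (some acc)
      = (altGo k (states.drop k)).map (acc + ·) := by
  rw [PySem.List.pyRange_one_eq_nil (by omega)]
  rw [altGo_short k _ (by simp; omega)]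
  simp [aFold]

theorem pair_eq_find (pat s : String) (hok : pvPairOK pat s) :
    get_index_of_substring (s.toList ++ s.toList) pat.toList
        = some (PySem.Str.find (s ++ s) pat)
      ∧ rkFirst (s.toList ++ s.toList) pat.toList = some (PySem.Str.find (s ++ s) pat) := by
  obtain ⟨h1, h2⟩ := hok
  have hne : pat.toList ≠ [] := by
    intro h; exact h1 (by rwa [String.toList_eq_nil_iff] at h)
  constructor
  · rw [gios_eq_find _ _ hne h2]
    congr 1
    simp [PySem.Str.find]
  · rw [rkFirst_eq_find _ _ hne h2]
    congr 1
    simp [PySem.Str.find]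

-- The summation loops agree, generalized over the start index.
theorem aFold_eq_altGo (states : List String) (hp : Pre_get_min_dial_cnt states) :
    ∀ (k : Nat) (acc : Int),
      aFold states (PySem.List.pyRange (k : Int) ((states.length : Int) - 1) 1) (some acc)
        = (altGo k (states.drop k)).map (acc + ·) := by
  suffices H : ∀ (n k : Nat) (acc : Int), states.length - 1 - k ≤ n →
      aFold states (PySem.List.pyRange (k : Int) ((states.length : Int) - 1) 1) (some acc)
        = (altGo k (states.drop k)).map (acc + ·) by
    intro k acc; exact H (states.length - 1 - k) k acc le_rfl
  intro n
  induction n with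
  | zero =>
    intro k acc hn
    exact aFold_base states k acc (by omega)
  | succ n ih =>
    intro k acc hn
    by_cases hk : k + 1 < states.length
    · have hk0 : k < states.length := by omega
      rw [PySem.List.pyRange_one_cons (by omega)]
      have e1 : PySem.List.pyGet? states (k : Int) = some states[k] := by
        rw [PySem.List.pyGet?_natCast, List.getElem?_eq_getElem hk0]
      have e2 : PySem.List.pyGet? states ((k : Int) + 1) = some states[k + 1] := by
        have : ((k : Int) + 1) = ((k + 1 : Nat) : Int) := by push_cast; ring
        rw [this, PySem.List.pyGet?_natCast, List.getElem?_eq_getElem hk]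
      have hm : PySem.Int.mod (k : Int) 2 = ((k % 2 : Nat) : Int) := by
        exact_mod_cast PySem.Int.mod_natCast k 2
      have hpre := hp k (by omega)
      have g1 : states.getD k "" = states[k] := List.getD_eq_getElem _ _ hk0
      have g2 : states.getD (k + 1) "" = states[k + 1] := List.getD_eq_getElem _ _ hk
      rw [g1, g2] at hpre
      have hdrop1 : states.drop k = states[k] :: states.drop (k + 1) := List.drop_eq_getElem_cons hk0
      have hdrop2 : states.drop (k + 1) = states[k + 1] :: states.drop (k + 2) := List.drop_eq_getElem_cons hk
      have hrange : PySem.List.pyRange ((k : Int) + 1) ((states.length : Int) - 1) 1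
          = PySem.List.pyRange (((k + 1 : Nat)) : Int) ((states.length : Int) - 1) 1 := by
        norm_num
      -- the value this step adds, on both sides
      set V : Int := if k % 2 = 0
          then PySem.Str.find (states[k + 1] ++ states[k + 1]) states[k]
          else PySem.Str.find (states[k] ++ states[k]) states[k + 1] with hV
      have hr : (if PySem.Int.mod (k : Int) 2 = 0
            then get_index_of_substring (states[k + 1].toList ++ states[k + 1].toList) states[k].toList
            else get_index_of_substring (states[k].toList ++ states[k].toList) states[k + 1].toList)
          = some V := by
        by_cases hpar : k % 2 = 0
        · rw [hV, if_pos hpar] at *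
          rw [if_pos (by rw [hm]; exact_mod_cast hpar)]
          exact (pair_eq_find _ _ hpre).1
        · rw [hV, if_neg hpar] at *
          rw [if_neg (by rw [hm]; intro h; exact hpar (by exact_mod_cast h))]
          exact (pair_eq_find _ _ hpre).1
      have hb : (if k % 2 = 0
            then rkFirst (states[k + 1].toList ++ states[k + 1].toList) states[k].toList
            else rkFirst (states[k].toList ++ states[k].toList) states[k + 1].toList)
          = some V := by
        by_cases hpar : k % 2 = 0
        · rw [hV, if_pos hpar] at *
          rw [if_pos hpar]
          exact (pair_eq_find _ _ hpre).2
        · rw [hV, if_neg hpar] at *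
          rw [if_neg hpar]
          exact (pair_eq_find _ _ hpre).2
      simp only [aFold, e1, e2, hr]
      rw [hrange, ih (k + 1) _ (by omega)]
      conv_rhs => rw [hdrop1, hdrop2]
      simp only [altGo]
      rw [← hdrop2, hb]
      cases h2 : altGo (k + 1) (states.drop (k + 1)) with
      | none => simp
      | some t => simp; ring
    · exact aFold_base states k acc (by omega)

-- ===== VERDICT (by name: the statement is the Claim_ definition above) =====
theorem get_min_dial_cnt_spec : Claim_equal_get_min_dial_cnt := by
  intro states _ hp
  unfold Spec_get_min_dial_cnt get_min_dial_cnt get_min_dial_cnt_alt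
  have h := aFold_eq_altGo states hp 0 0
  rw [Nat.cast_zero] at h
  rw [h]
  cases h2 : altGo 0 (states.drop 0) with
  | none => rw [List.drop_zero] at h2; simp [h2]
  | some t => rw [List.drop_zero] at h2; simp [h2]
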